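-- pv_equiv track=rewrite | github.com/EnotBro/knapsack_ga | src/genetic.py | __zigzag_crossover
-- ===== SOURCE A (Python) =====
-- def __zigzag_crossover(first_parent: list[int], second_parent: list[int]) -> tuple[list[int], list[int]]:
--     first_child = []
--     second_child = []
--     zigzag_direction = 0
--     number_of_objects = len(first_parent)
--     for i in range(number_of_objects):
--         first_gene = first_parent[i]
--         second_gene = second_parent[i]
--         if zigzag_direction == 0:
--             first_child.append(first_gene)
--             second_child.append(second_gene)
--         else:
--             first_child.append(second_gene)
--             second_child.append(first_gene)
--         zigzag_direction = zigzag_direction ^ 1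
--
--     return first_child, second_child
-- ===== SOURCE B (Python) =====
-- def __zigzag_crossover(first_parent: list[int], second_parent: list[int]) -> tuple[list[int], list[int]]:
--     n = len(first_parent)
--     first_child = list(first_parent)
--     first_child[1::2] = second_parent[1:n:2]
--     second_child = second_parent[:n]
--     second_child[1::2] = first_parent[1::2]
--     return first_child, second_child
-- ===== Notes on version B (the rewrite author's own statement) =====
-- stated objective: alternative
-- what changed: Replaces the single index loop with a toggling direction flag by copy-then-patch: each child starts as a full copy of one parent and its odd positions are overwritten with the other parent's odd-position strided slice.
import Mathlib
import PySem

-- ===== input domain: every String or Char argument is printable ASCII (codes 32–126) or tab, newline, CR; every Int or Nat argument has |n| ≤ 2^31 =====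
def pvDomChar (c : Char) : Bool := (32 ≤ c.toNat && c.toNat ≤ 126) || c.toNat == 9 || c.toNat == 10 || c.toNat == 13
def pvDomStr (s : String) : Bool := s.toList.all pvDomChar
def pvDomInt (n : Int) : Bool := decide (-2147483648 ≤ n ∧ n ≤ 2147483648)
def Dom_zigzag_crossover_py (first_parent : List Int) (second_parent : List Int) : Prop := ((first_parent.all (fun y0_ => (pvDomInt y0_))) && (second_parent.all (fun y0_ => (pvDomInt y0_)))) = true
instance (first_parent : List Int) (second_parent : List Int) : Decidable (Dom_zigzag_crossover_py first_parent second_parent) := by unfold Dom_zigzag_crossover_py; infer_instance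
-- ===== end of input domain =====

-- B builds each child as a full copy of one parent with the odd positions overwritten by the
-- other parent's odd-position strided slice, instead of A's single toggling index loop.

-- ===== PORT A =====
-- pyGetD is exact here: Pre_ guarantees every index 0 ≤ i < len(first_parent) is in range of both lists.
def zigzag_crossover_py (first_parent : List Int) (second_parent : List Int) : List Int × List Int :=
  let number_of_objects : Int := first_parent.length
  let st := (PySem.List.pyRange 0 number_of_objects 1).foldl
    (fun (st : List Int × List Int × Int) i =>
      let first_gene := PySem.List.pyGetD first_parent i 0
      let second_gene := PySem.List.pyGetD second_parent i 0
      if st.2.2 == 0 then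
        (st.1 ++ [first_gene], st.2.1 ++ [second_gene], PySem.Int.bxor st.2.2 1)
      else
        (st.1 ++ [second_gene], st.2.1 ++ [first_gene], PySem.Int.bxor st.2.2 1))
    ([], [], 0)
  (st.1, st.2.1)

-- ===== PORT B =====
-- xs[1::2] (elements at odd indices)
def pvOddSlice : List Int → List Int
  | [] => []
  | [_] => []
  | _ :: y :: xs => y :: pvOddSlice xs

-- 'base[1::2] = patch': copy of base with the odd positions replaced by the patch elements in order
def pvPatchOdd : List Int → List Int → List Int
  | [], _ => []
  | [x], _ => [x]
  | x :: y :: xs, [] => x :: y :: xs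
  | x :: _ :: xs, p :: ps => x :: p :: pvPatchOdd xs ps

def zigzag_crossover_py_alt (first_parent : List Int) (second_parent : List Int) : List Int × List Int :=
  let n := first_parent.length
  let first_child := pvPatchOdd first_parent (pvOddSlice (second_parent.take n))
  let second_child := pvPatchOdd (second_parent.take n) (pvOddSlice first_parent)
  (first_child, second_child)

-- ===== PRECONDITION & SPEC =====
-- A raises IndexError (and B's slice assignment raises ValueError) when the second parent is
-- shorter than the first; Pre_ excludes exactly those inputs.
def Pre_zigzag_crossover_py (first_parent : List Int) (second_parent : List Int) : Prop :=
  first_parent.length ≤ second_parent.length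
instance (first_parent : List Int) (second_parent : List Int) : Decidable (Pre_zigzag_crossover_py first_parent second_parent) := by unfold Pre_zigzag_crossover_py; infer_instance

def pvWitness_zigzag_crossover_py : List Int × List Int := ([1, 2, 3], [4, 5, 6])

def Spec_zigzag_crossover_py (first_parent : List Int) (second_parent : List Int) (out : List Int × List Int) : Prop := out = zigzag_crossover_py_alt first_parent second_parent
instance (first_parent : List Int) (second_parent : List Int) (out : List Int × List Int) : Decidable (Spec_zigzag_crossover_py first_parent second_parent out) := by unfold Spec_zigzag_crossover_py; infer_instance

-- ===== CLAIM (what is proved, stated in full; the proofs are below) =====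
def Claim_equal_zigzag_crossover_py : Prop := ∀ (first_parent : List Int) (second_parent : List Int), Dom_zigzag_crossover_py first_parent second_parent → Pre_zigzag_crossover_py first_parent second_parent → Spec_zigzag_crossover_py first_parent second_parent (zigzag_crossover_py first_parent second_parent)

-- ===== LEMMAS AND PROOFS =====

-- A's loop over the zipped parents equals B's copy-and-patch, for any accumulator prefixes.
theorem pv_loop_eq : ∀ (l : List (Int × Int)) (fc sc : List Int),
    l.foldl
      (fun (st : List Int × List Int × Int) p =>
        if st.2.2 == 0 then
          (st.1 ++ [p.1], st.2.1 ++ [p.2], PySem.Int.bxor st.2.2 1)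
        else
          (st.1 ++ [p.2], st.2.1 ++ [p.1], PySem.Int.bxor st.2.2 1))
      (fc, sc, 0)
    = (fc ++ pvPatchOdd (l.map Prod.fst) (pvOddSlice (l.map Prod.snd)),
       sc ++ pvPatchOdd (l.map Prod.snd) (pvOddSlice (l.map Prod.fst)),
       if l.length % 2 = 0 then (0:Int) else 1)
  | [], fc, sc => by simp [pvPatchOdd, pvOddSlice]
  | [p], fc, sc => by simp [pvPatchOdd, pvOddSlice]; decide
  | p :: q :: rest, fc, sc => by
      have ih := pv_loop_eq rest (fc ++ [p.1, q.2]) (sc ++ [p.2, q.1])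
      have hm : (rest.length + 1 + 1) % 2 = rest.length % 2 := by omega
      simp only [List.foldl_cons, List.map_cons, List.length_cons, hm]
      norm_num [show PySem.Int.bxor 0 1 = 1 from by decide,
                show PySem.Int.bxor 1 1 = 0 from by decide]
      simp only [beq_iff_eq] at ih
      rw [ih]
      simp [pvPatchOdd, pvOddSlice]

theorem zig_main (fp sp : List Int) (h : fp.length ≤ sp.length) :
    zigzag_crossover_py fp sp = zigzag_crossover_py_alt fp sp := by
  simp only [zigzag_crossover_py, zigzag_crossover_py_alt]
  have hlen : (fp.zip sp).length = fp.length := by simp [List.length_zip]; omega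
  have hstep : (PySem.List.pyRange 0 (fp.length : Int) 1).foldl
      (fun (st : List Int × List Int × Int) i =>
        let first_gene := PySem.List.pyGetD fp i 0
        let second_gene := PySem.List.pyGetD sp i 0
        if st.2.2 == 0 then
          (st.1 ++ [first_gene], st.2.1 ++ [second_gene], PySem.Int.bxor st.2.2 1)
        else
          (st.1 ++ [second_gene], st.2.1 ++ [first_gene], PySem.Int.bxor st.2.2 1))
      ([], [], 0)
    = (PySem.List.pyRange 0 ((fp.zip sp).length : Int) 1).foldl
      (fun (st : List Int × List Int × Int) i =>
        (fun (st : List Int × List Int × Int) (p : Int × Int) =>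
          if st.2.2 == 0 then
            (st.1 ++ [p.1], st.2.1 ++ [p.2], PySem.Int.bxor st.2.2 1)
          else
            (st.1 ++ [p.2], st.2.1 ++ [p.1], PySem.Int.bxor st.2.2 1))
          st (PySem.List.pyGetD (fp.zip sp) i (0, 0)))
      ([], [], 0) := by
    rw [hlen]
    apply PySem.List.foldl_congr_mem
    intro acc x hx
    rw [PySem.List.mem_pyRange_one] at hx
    have h1 : PySem.List.pyGetD fp x 0 = fp[x.toNat]'(by omega) :=
      PySem.List.pyGetD_eq_getElem fp 0 hx.1 (by omega)
    have h2 : PySem.List.pyGetD sp x 0 = sp[x.toNat]'(by omega) :=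
      PySem.List.pyGetD_eq_getElem sp 0 hx.1 (by omega)
    have h3 : PySem.List.pyGetD (fp.zip sp) x (0, 0) = (fp.zip sp)[x.toNat]'(by omega) :=
      PySem.List.pyGetD_eq_getElem (fp.zip sp) (0, 0) hx.1 (by omega)
    simp only [h1, h2, h3, List.getElem_zip]
  have hfst : (fp.zip sp).map Prod.fst = fp := List.map_fst_zip h
  have hz : fp.zip sp = fp.zip (sp.take fp.length) := by
    rw [List.zip_eq_zip_take_min, Nat.min_eq_left h, List.take_length]
  have hsnd : (fp.zip sp).map Prod.snd = sp.take fp.length := by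
    rw [hz]; exact List.map_snd_zip (by simp [Nat.min_eq_left h])

  rw [hstep, PySem.List.foldl_pyRange_zero_pyGetD' (fp.zip sp) (0, 0)
        (fun (st : List Int × List Int × Int) (p : Int × Int) =>
          if st.2.2 == 0 then
            (st.1 ++ [p.1], st.2.1 ++ [p.2], PySem.Int.bxor st.2.2 1)
          else
            (st.1 ++ [p.2], st.2.1 ++ [p.1], PySem.Int.bxor st.2.2 1))
        ([], [], 0),
      pv_loop_eq, hfst, hsnd]
  simp

-- ===== VERDICT (by name: the statement is the Claim_ definition above) =====
theorem zigzag_crossover_py_spec : Claim_equal_zigzag_crossover_py := by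
  intro fp sp _ hpre
  exact zig_main fp sp hpre
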